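-- pv_equiv track=rewrite | github.com/hong0002/Baekjoon | 기타/인생은 한 방.py | is_lucky_lotto
-- ===== SOURCE A (Python) =====
-- def is_lucky_lotto(s: str) -> bool:
--     run = 1
--     for i in range(1, len(s)):
--         if abs(ord(s[i]) - ord(s[i-1])) == 1:
--             run += 1
--             if run >= 5:
--                 return True
--         else:
--             run = 1
--     return False
-- ===== SOURCE B (Python) =====
-- def is_lucky_lotto(s: str) -> bool:
--     for i in range(len(s) - 4):
--         if all(abs(ord(s[i + j + 1]) - ord(s[i + j])) == 1 for j in range(4)):
--             return True
--     return False
-- ===== Notes on version B (the rewrite author's own statement) =====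
-- stated objective: alternative
-- what changed: Replaced the running-counter-with-reset scan by a sliding length-5 window: for each start index, check all four consecutive pairs for adjacent ordinals and return on the first passing window.
import Mathlib
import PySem

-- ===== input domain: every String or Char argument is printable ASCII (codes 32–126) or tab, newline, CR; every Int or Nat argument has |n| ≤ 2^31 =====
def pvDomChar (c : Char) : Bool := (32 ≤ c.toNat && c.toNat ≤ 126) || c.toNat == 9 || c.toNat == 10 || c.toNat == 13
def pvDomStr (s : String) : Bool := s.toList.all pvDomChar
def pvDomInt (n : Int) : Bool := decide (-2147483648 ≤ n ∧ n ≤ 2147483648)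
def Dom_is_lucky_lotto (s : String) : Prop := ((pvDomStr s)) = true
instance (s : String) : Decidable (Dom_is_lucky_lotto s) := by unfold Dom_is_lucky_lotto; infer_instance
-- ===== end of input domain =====

-- B replaces A's running counter (reset on a non-adjacent pair) by a sliding length-5 window
-- checked pair-by-pair: a different decomposition of the same O(n) scan, not claimed faster.


-- abs(ord(s[k+1]) - ord(s[k])) == 1, shared by both ports (indices always in range where used)
def pyAdj (cs : List Char) (k : Nat) : Bool :=
  (((cs.getD (k + 1) ' ').toNat : Int) - ((cs.getD k ' ').toNat : Int)).natAbs == 1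

-- ===== PORT A =====
-- the 'for i in range(1, len(s))' loop with early return, as index recursion over the same state
def isLuckyGoA (cs : List Char) (i : Nat) (run : Int) : Bool :=
  if i < cs.length then
    if pyAdj cs (i - 1) then
      if run + 1 ≥ 5 then true
      else isLuckyGoA cs (i + 1) (run + 1)
    else isLuckyGoA cs (i + 1) 1
  else false
termination_by cs.length - i

def is_lucky_lotto (s : String) : Bool := isLuckyGoA s.toList 1 1

-- ===== PORT B =====
-- for i in range(len(s)-4): if all(... for j in range(4)): return True
def is_lucky_lotto_alt (s : String) : Bool :=
  (List.range (s.toList.length - 4)).any (fun i => (List.range 4).all (fun j => pyAdj s.toList (i + j)))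

-- ===== PRECONDITION & SPEC =====
def Spec_is_lucky_lotto (s : String) (out : Bool) : Prop := out = is_lucky_lotto_alt s
instance (s : String) (out : Bool) : Decidable (Spec_is_lucky_lotto s out) := by unfold Spec_is_lucky_lotto; infer_instance

-- ===== CLAIM (what is proved, stated in full; the proofs are below) =====
def Claim_equal_is_lucky_lotto : Prop := ∀ (s : String), Dom_is_lucky_lotto s → Spec_is_lucky_lotto s (is_lucky_lotto s)

-- ===== LEMMAS AND PROOFS =====

-- "some length-5 window of adjacent ordinals starts at or after t"
def HasWin (cs : List Char) (t : Nat) : Prop :=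
  ∃ k, t ≤ k ∧ k + 5 ≤ cs.length ∧ ∀ j, j < 4 → pyAdj cs (k + j) = true

theorem hasWin_mono {cs : List Char} {t t' : Nat} (h : t ≤ t') (hw : HasWin cs t') :
    HasWin cs t := by
  obtain ⟨k, hk1, hk2, hk3⟩ := hw
  exact ⟨k, le_trans h hk1, hk2, hk3⟩

-- if the pair at i-1 is not adjacent, no window can straddle it
theorem hasWin_shift {cs : List Char} {i r : Nat} (hi : 1 ≤ i) (hr : r ≤ 4)
    (ha : pyAdj cs (i - 1) = false) : HasWin cs (i - r) ↔ HasWin cs i := by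
  constructor
  · rintro ⟨k, hk1, hk2, hk3⟩
    refine ⟨k, ?_, hk2, hk3⟩
    by_contra hlt
    push Not at hlt
    have hj : k + ((i - 1) - k) = i - 1 := by omega
    have := hk3 ((i - 1) - k) (by omega)
    rw [hj] at this
    rw [this] at ha
    exact Bool.noConfusion ha
  · exact hasWin_mono (by omega)

theorem goA_eq (cs : List Char) : ∀ (n i : Nat) (run : Int), cs.length - i ≤ n →
    1 ≤ run → run ≤ 4 → run.toNat ≤ i →
    (∀ m, i - run.toNat ≤ m → m + 1 < i → pyAdj cs m = true) →
    (isLuckyGoA cs i run = true ↔ HasWin cs (i - run.toNat)) := by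
  intro n
  induction n with
  | zero =>
    intro i run hn h1 h4 hri _
    have hi : ¬ i < cs.length := by omega
    rw [isLuckyGoA, if_neg hi]
    simp only [Bool.false_eq_true, false_iff]
    rintro ⟨k, hk1, hk2, _⟩
    omega
  | succ n ih =>
    intro i run hn h1 h4 hri H
    by_cases hi : i < cs.length
    · rw [isLuckyGoA, if_pos hi]
      by_cases ha : pyAdj cs (i - 1) = true
      · rw [if_pos ha]
        by_cases h5 : run + 1 ≥ 5
        · rw [if_pos h5]
          have hr4 : run = 4 := by omega
          simp only [true_iff]
          refine ⟨i - 4, by omega, by omega, ?_⟩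
          intro j hj
          rcases Nat.lt_or_ge j 3 with hj3 | hj3
          · exact H (i - 4 + j) (by omega) (by omega)
          · have : i - 4 + j = i - 1 := by omega
            rw [this]; exact ha
        · rw [if_neg h5]
          have hkey : (i + 1) - (run + 1).toNat = i - run.toNat := by omega
          have := ih (i + 1) (run + 1) (by omega) (by omega) (by omega) (by omega)
            (by
              intro m hm1 hm2
              rcases Nat.lt_or_ge (m + 1) i with hmi | hmi
              · exact H m (by omega) hmi
              · have : m = i - 1 := by omega
                rw [this]; exact ha)
          rw [hkey] at this
          exact this
      · rw [if_neg ha]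
        have := ih (i + 1) 1 (by omega) (by omega) (by omega) (by omega)
          (by
            intro m hm1 hm2
            exfalso
            simp only [Int.toNat_one] at hm1
            omega)
        have hkey : (i + 1) - (1 : Int).toNat = i := by omega
        rw [hkey] at this
        rw [this]
        exact (hasWin_shift (r := run.toNat) (by omega) (by omega) (Bool.not_eq_true _ ▸ ha)).symm
    · rw [isLuckyGoA, if_neg hi]
      simp only [Bool.false_eq_true, false_iff]
      rintro ⟨k, hk1, hk2, _⟩
      omega

theorem alt_iff (s : String) : is_lucky_lotto_alt s = true ↔ HasWin s.toList 0 := by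
  unfold is_lucky_lotto_alt HasWin
  simp only [List.any_eq_true, List.all_eq_true, List.mem_range]
  constructor
  · rintro ⟨i, hi, hall⟩
    exact ⟨i, Nat.zero_le _, by omega, fun j hj => hall j hj⟩
  · rintro ⟨k, _, hk2, hall⟩
    exact ⟨k, by omega, fun j hj => hall j hj⟩

-- ===== VERDICT (by name: the statement is the Claim_ definition above) =====
theorem is_lucky_lotto_spec : Claim_equal_is_lucky_lotto := by
  intro s _
  unfold Spec_is_lucky_lotto is_lucky_lotto
  have hA := goA_eq s.toList (s.toList.length) 1 1 (by omega) (by omega) (by omega)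
    (by omega) (by intro m hm1 hm2; omega)
  have h1 : (1 : Nat) - (1 : Int).toNat = 0 := by omega
  rw [h1] at hA
  exact Bool.eq_iff_iff.mpr (hA.trans (alt_iff s).symm)
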